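-- pv_equiv track=rewrite | github.com/mxavier-dev/bmi-calculator | BMI_calculator-EN.py | only_numbers_weight
-- ===== SOURCE A (Python) =====
-- def only_numbers_weight(char):
--     """Validates if the string `char` is an acceptable number for the Entry.
--     Rules:
--     - allow empty string (so user can clear field)
--     - allow only digits and at most one comma (for decimal separator)
--     - do not allow starting with a comma
--     - limit length to 5 characters (to prevent excessively long input)
--     """
--     if char == '':
--         return True
--     if char.count(',') > 1:
--         return False
--     if char[0] == ',':
--         return False
--     if len(char) > 5:
--         return False
--     if all(c in '0123456789,' for c in char):
--         return True
--     return False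
-- ===== SOURCE B (Python) =====
-- def only_numbers_weight(char):
--     """Single-pass recursive state machine: scan position i carrying how many
--     separators were seen so far; accept when the end is reached, and reject as
--     soon as the scan hits position 5 with input left, a leading or repeated
--     separator, or a character that is neither a digit nor the separator."""
--     def scan(i, commas):
--         if i == len(char):
--             return True
--         if i == 5:
--             return False
--         c = char[i]
--         if c == ',':
--             return i > 0 and commas == 0 and scan(i + 1, 1)
--         return '0' <= c <= '9' and scan(i + 1, commas)
--     return scan(0, 0)
-- ===== Notes on version B (the rewrite author's own statement) =====
-- stated objective: alternative
-- what changed: Replaced A's staged whole-string passes (a full-string separator count, a length check, and an all(...) charset scan) by one short-circuiting recursive state machine that walks the string once carrying the separator count and rejects at the first offending position.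
import Mathlib
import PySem

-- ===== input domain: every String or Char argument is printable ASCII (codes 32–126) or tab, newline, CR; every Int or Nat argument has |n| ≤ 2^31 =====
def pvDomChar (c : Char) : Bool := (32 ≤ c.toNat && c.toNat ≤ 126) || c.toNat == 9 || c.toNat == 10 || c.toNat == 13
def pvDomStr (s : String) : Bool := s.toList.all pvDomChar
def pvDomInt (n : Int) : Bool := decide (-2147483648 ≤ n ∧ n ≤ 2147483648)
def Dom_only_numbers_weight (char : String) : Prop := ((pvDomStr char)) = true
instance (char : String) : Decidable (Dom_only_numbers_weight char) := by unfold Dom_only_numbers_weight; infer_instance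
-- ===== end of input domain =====

-- B replaces A's staged whole-string passes (count, length check, all(...) charset scan)
-- by one short-circuiting recursive scan carrying the comma count: an alternative decomposition, same result.


-- ===== PORT A =====
-- "c in '0123456789,'" for a single char is exactly membership in the charset, ported as contains.
def only_numbers_weight (char : String) : Bool :=
  if char == "" then true
  else if 1 < PySem.Str.count char "," then false
  else
    match PySem.Str.pyGet? char 0 with
    | none => false   -- unreachable: char is nonempty here
    | some c0 =>
      if c0 == ',' then false
      else if 5 < PySem.Str.len char then false
      else if char.toList.all (fun c => "0123456789,".toList.contains c) then true
      else false

-- ===== PORT B =====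
-- port of Source B's inner `scan(i, commas)`; char[i] (0 ≤ i < len guaranteed by the guards) is list indexing
def pvScan (cs : List Char) (i : Nat) (commas : Nat) : Bool :=
  if i == cs.length then true
  else if i == 5 then false
  else
    match h : cs[i]? with
    | none => false   -- unreachable: i < len here
    | some c =>
      if c == ',' then decide (0 < i) && (commas == 0) && pvScan cs (i + 1) 1
      else decide ('0' ≤ c ∧ c ≤ '9') && pvScan cs (i + 1) commas
  termination_by cs.length - i
  decreasing_by
    all_goals
      have : i < cs.length := (List.getElem?_eq_some_iff.mp h).1
      omega

def only_numbers_weight_alt (char : String) : Bool := pvScan char.toList 0 0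

-- ===== PRECONDITION & SPEC =====
def Spec_only_numbers_weight (char : String) (out : Bool) : Prop := out = only_numbers_weight_alt char
instance (char : String) (out : Bool) : Decidable (Spec_only_numbers_weight char out) := by unfold Spec_only_numbers_weight; infer_instance

-- ===== CLAIM (what is proved, stated in full; the proofs are below) =====
def Claim_equal_only_numbers_weight : Prop := ∀ (char : String), Dom_only_numbers_weight char → Spec_only_numbers_weight char (only_numbers_weight char)

-- ===== LEMMAS AND PROOFS =====

-- one unfolding step of B's scan when the guards pass
theorem pvScan_step (cs : List Char) (i commas : Nat) (hlt : i < cs.length) (h5 : i ≠ 5) :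
    pvScan cs i commas = (if cs[i] = ',' then decide (0 < i) && (commas == 0) && pvScan cs (i + 1) 1
      else decide ('0' ≤ cs[i] ∧ cs[i] ≤ '9') && pvScan cs (i + 1) commas) := by
  rw [pvScan]
  rw [if_neg (by simp; omega), if_neg (by simpa using h5)]
  split
  · next h => simp at h; omega
  · next c h =>
    have hc : c = cs[i] := by
      rw [List.getElem?_eq_getElem hlt] at h; exact (Option.some_inj.mp h).symm
    subst hc
    simp

-- characterisation of B's scan from a positive position
theorem pvScan_char (cs : List Char) (i commas : Nat) (h1 : 1 ≤ i) (hle : i ≤ cs.length)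
    (h5 : i ≤ 5) (hc : commas ≤ 1) :
    pvScan cs i commas =
      (decide (cs.length ≤ 5)
        && (cs.drop i).all (fun c => decide ('0' ≤ c ∧ c ≤ '9') || c == ',')
        && decide ((cs.drop i).count ',' + commas ≤ 1)) := by
  generalize hfuel : cs.length - i = n
  induction n generalizing i commas with
  | zero =>
    have hi : i = cs.length := by omega
    rw [pvScan, if_pos (by simp [hi])]
    simp [hi, List.drop_length]
    omega
  | succ n ih =>
    have hlt : i < cs.length := by omega
    have hdrop : cs.drop i = cs[i] :: cs.drop (i + 1) := List.drop_eq_getElem_cons hlt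
    by_cases hi5 : i = 5
    · rw [pvScan, if_neg (by simp; omega), if_pos (by simp [hi5])]
      have hh : ¬ cs.length ≤ 5 := by omega
      simp [hh]
    · rw [pvScan_step cs i commas hlt hi5]
      by_cases hcomma : cs[i] = ','
      · rw [if_pos hcomma]
        rcases Nat.le_one_iff_eq_zero_or_eq_one.mp hc with h0 | h0 <;> subst h0
        · rw [ih (i+1) 1 (by omega) (by omega) (by omega) (by omega) (by omega)]
          simp [hdrop, hcomma]
          omega
        · have hge : 1 ≤ (cs.drop i).count ',' := by
            rw [hdrop]; simp [hcomma]
          have hh : ¬ ((cs.drop i).count ',' + 1 ≤ 1) := by omega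
          simp [hh]
      · rw [if_neg hcomma, ih (i+1) commas (by omega) (by omega) (by omega) hc (by omega)]
        rw [Bool.eq_iff_iff]
        simp only [hdrop, List.all_cons, List.count_cons, Bool.and_eq_true, Bool.or_eq_true,
          decide_eq_true_eq, beq_iff_eq, hcomma, if_false, List.all_eq_true]
        tauto

-- A's char.count(','): Chars.count with a single-char needle is List.count (no PySem lemma names this)
theorem pv_count_go_single (c : Char) (s : List Char) : ∀ (fuel acc : Nat), s.length ≤ fuel →
    PySem.Chars.count.go [c] fuel s acc = acc + s.count c := by
  induction s with
  | nil => intro fuel acc _; cases fuel <;> simp [PySem.Chars.count.go]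
  | cons d t ih =>
    intro fuel acc hf
    cases fuel with
    | zero => simp at hf
    | succ f =>
      rw [PySem.Chars.count.go]
      by_cases hdc : d = c
      · subst hdc
        simp [List.isPrefixOf, ih f (acc+1) (by simpa using hf)]
        omega
      · simp [List.isPrefixOf, hdc, ih f acc (by simpa using hf), Ne.symm hdc]

theorem pv_count_single (c : Char) (s : List Char) : PySem.Chars.count s [c] = s.count c := by
  simp [PySem.Chars.count, pv_count_go_single c s s.length 0 le_rfl]

-- membership in A's charset string is exactly "digit or comma"
theorem pv_charset_eq (d : Char) :
    ("0123456789,".toList.contains d) = (decide ('0' ≤ d ∧ d ≤ '9') || d == ',') := by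
  have h : "0123456789,".toList = ['0','1','2','3','4','5','6','7','8','9',','] := rfl
  rw [h, Bool.eq_iff_iff]
  simp [Char.ext_iff, Char.le_def, UInt32.le_iff_toNat_le, UInt32.toNat_ofNat, UInt32.ext_iff]
  omega

-- ===== VERDICT (by name: the statement is the Claim_ definition above) =====
theorem only_numbers_weight_spec : Claim_equal_only_numbers_weight := by
  intro char _
  unfold Spec_only_numbers_weight only_numbers_weight only_numbers_weight_alt
  by_cases h0 : char = ""
  · subst h0; simp [pvScan]
  · have hne : char.toList ≠ [] := fun h => h0 (String.toList_inj.mp (by simpa using h))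
    obtain ⟨c0, rest, hcs⟩ : ∃ c0 rest, char.toList = c0 :: rest := by
      cases hc : char.toList with
      | nil => exact absurd hc hne
      | cons c0 rest => exact ⟨c0, rest, rfl⟩
    have hget : PySem.Str.pyGet? char (0 : Int) = some c0 := by simp [hcs]
    have hcount : PySem.Str.count char "," = (c0 :: rest).count ',' := by
      have h1 : ",".toList = [','] := rfl
      simp only [PySem.Str.count_eq, h1, pv_count_single, hcs]
    simp only [beq_iff_eq, h0, if_false, hget, hcount, PySem.Str.len_eq]
    simp only [hcs]
    rw [pvScan_step (c0 :: rest) 0 0 (by simp) (by decide)]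
    simp only [List.getElem_cons_zero]
    by_cases hc0 : c0 = ','
    · rw [if_pos hc0]
      split_ifs <;> simp_all
    · have hcc : List.count ',' (c0 :: rest) = List.count ',' rest := by
        rw [List.count_cons]; simp; exact hc0
      rw [if_neg hc0, hcc,
        pvScan_char (c0 :: rest) 1 0 le_rfl (by simp) (by omega) (by omega)]
      simp only [List.drop_one, List.tail_cons, Nat.add_zero]
      rw [Bool.eq_iff_iff]
      have hInt : ¬ ((5:Int) < ((c0 :: rest).length : Int)) ↔ (c0 :: rest).length ≤ 5 := by
        constructor <;> intro h <;> omega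
      split_ifs with h1 h2 h3
      · simp only [false_iff, Bool.and_eq_true, decide_eq_true_eq]
        rintro ⟨-, -, hcnt⟩
        omega
      · simp only [false_iff, Bool.and_eq_true, decide_eq_true_eq]
        rintro ⟨-, ⟨hl, -⟩, -⟩
        omega
      · simp only [List.all_cons, pv_charset_eq, Bool.and_eq_true, Bool.or_eq_true,
          decide_eq_true_eq, beq_iff_eq, List.all_eq_true] at h3
        simp only [true_iff, Bool.and_eq_true, decide_eq_true_eq, List.all_eq_true,
          Bool.or_eq_true, beq_iff_eq]
        exact ⟨h3.1.resolve_right hc0, ⟨hInt.mp h2, h3.2⟩, by omega⟩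
      · simp only [false_iff, Bool.and_eq_true, decide_eq_true_eq,
          List.all_eq_true, Bool.or_eq_true, beq_iff_eq]
        rintro ⟨hd, ⟨-, hall⟩, -⟩
        refine h3 ?_
        simp only [List.all_cons, pv_charset_eq, Bool.and_eq_true, Bool.or_eq_true,
          decide_eq_true_eq, beq_iff_eq, List.all_eq_true]
        exact ⟨Or.inl hd, hall⟩
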